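-- pv_equiv track=rewrite | github.com/xiaotea/VIA | Tool/LLMVulnerabilityExistence/getDectionData/Jarvis/external_interface.py | find_graph_differences
-- ===== SOURCE A (Python) =====
-- def find_graph_differences(graph1, graph2):
--     nodes_g1 = set(graph1.keys())
--     nodes_g2 = set(graph2.keys())
--
--     # 找出新增和删除的节点
--     nodes_added = nodes_g2 - nodes_g1
--     nodes_removed = nodes_g1 - nodes_g2
--
--     # 找出所有节点的集合
--     all_nodes = nodes_g1.union(nodes_g2)
--
--     # 找出新增和删除的边
--     edges_added = set()
--     edges_removed = set()
--
--     for node in all_nodes: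
--         neighbors_g1 = set(graph1.get(node, []))
--         neighbors_g2 = set(graph2.get(node, []))
--
--         new_edges = {(node, neighbor) for neighbor in neighbors_g2 - neighbors_g1}
--         removed_edges = {(node, neighbor) for neighbor in neighbors_g1 - neighbors_g2}
--
--         edges_added.update(new_edges)
--         edges_removed.update(removed_edges)
--
--     return nodes_added, nodes_removed, edges_added, edges_removed
-- ===== SOURCE B (Python) =====
-- def find_graph_differences(graph1, graph2):
--     # One pass over graph1 while consuming a working copy of graph2:
--     # matched nodes are diffed and popped; whatever is left of the copy
--     # afterwards is exactly the added nodes and their (all new) edges.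
--     rest = dict(graph2)
--     nodes_removed = []
--     edges_added = []
--     edges_removed = []
--     for node, nbrs1 in graph1.items():
--         nbrs2 = rest.pop(node, None)
--         if nbrs2 is None:
--             nodes_removed.append(node)
--             nbrs2 = []
--         seen1 = set(nbrs1)
--         seen2 = set(nbrs2)
--         edges_added += [(node, nb) for nb in dict.fromkeys(nbrs2) if nb not in seen1]
--         edges_removed += [(node, nb) for nb in dict.fromkeys(nbrs1) if nb not in seen2]
--     nodes_added = set(rest)
--     for node, nbrs in rest.items():
--         edges_added += [(node, nb) for nb in dict.fromkeys(nbrs)]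
--     return nodes_added, set(nodes_removed), set(edges_added), set(edges_removed)
-- ===== Notes on version B (the rewrite author's own statement) =====
-- stated objective: alternative
-- what changed: B replaces A's all_nodes union and per-node double subtraction by a consume-and-residual merge: one pass over graph1 pops each matched node from a working copy of graph2 (collecting removed nodes and both per-node edge diffs as it goes), and the residual of the copy afterwards directly yields the added nodes and the edges of brand-new nodes.
import Mathlib
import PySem

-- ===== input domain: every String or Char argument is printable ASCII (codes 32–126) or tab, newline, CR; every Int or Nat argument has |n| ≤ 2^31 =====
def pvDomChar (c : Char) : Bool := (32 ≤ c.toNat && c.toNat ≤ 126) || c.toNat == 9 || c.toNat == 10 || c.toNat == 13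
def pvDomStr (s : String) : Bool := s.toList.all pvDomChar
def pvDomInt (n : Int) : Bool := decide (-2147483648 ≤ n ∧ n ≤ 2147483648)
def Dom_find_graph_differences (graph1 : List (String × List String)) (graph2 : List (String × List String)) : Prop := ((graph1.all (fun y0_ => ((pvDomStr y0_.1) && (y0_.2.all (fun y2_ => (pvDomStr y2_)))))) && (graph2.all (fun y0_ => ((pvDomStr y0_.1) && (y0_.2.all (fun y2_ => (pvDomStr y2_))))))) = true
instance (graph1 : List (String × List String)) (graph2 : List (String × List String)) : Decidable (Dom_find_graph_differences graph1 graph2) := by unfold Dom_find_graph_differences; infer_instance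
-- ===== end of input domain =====

-- B replaces A's all_nodes union + per-node double subtraction by a consume-and-residual merge:
-- one pass over graph1 pops matched nodes from a working copy of graph2; the residual copy then
-- yields the added nodes and the edges of brand-new nodes (objective: alternative).

-- ===== PORT A =====
def find_graph_differences (graph1 : List (String × List String)) (graph2 : List (String × List String)) : List String × List String × (List (String × String)) × (List (String × String)) :=
  let d1 := PySem.Dict.mk graph1
  let d2 := PySem.Dict.mk graph2
  let nodes_g1 : PySem.Set String := PySem.Set.ofList (PySem.Dict.keys d1)
  let nodes_g2 : PySem.Set String := PySem.Set.ofList (PySem.Dict.keys d2)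
  let nodes_added := PySem.Set.diff nodes_g2 nodes_g1
  let nodes_removed := PySem.Set.diff nodes_g1 nodes_g2
  let all_nodes := PySem.Set.union nodes_g1 nodes_g2
  let acc := all_nodes.foldl
    (fun (acc : PySem.Set (String × String) × PySem.Set (String × String)) node =>
      let neighbors_g1 : PySem.Set String := PySem.Set.ofList (PySem.Dict.getD d1 node [])
      let neighbors_g2 : PySem.Set String := PySem.Set.ofList (PySem.Dict.getD d2 node [])
      let new_edges := (PySem.Set.diff neighbors_g2 neighbors_g1).map (fun neighbor => (node, neighbor))
      let removed_edges := (PySem.Set.diff neighbors_g1 neighbors_g2).map (fun neighbor => (node, neighbor))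
      (PySem.Set.update acc.1 new_edges, PySem.Set.update acc.2 removed_edges))
    (PySem.Set.empty, PySem.Set.empty)
  (nodes_added, nodes_removed, acc.1, acc.2)

-- ===== PORT B =====
-- loop body of Source B's single pass over graph1.items(): rest.pop(node, None) = lookup + erase
def pvStepB (st : PySem.Dict String (List String) × List String × List (String × String) × List (String × String)) (p : String × List String) : PySem.Dict String (List String) × List String × List (String × String) × List (String × String) :=
  let nbrs2opt := st.1.get? p.1
  let rest := st.1.erase p.1
  let nodes_removed := match nbrs2opt with
    | none => st.2.1 ++ [p.1]
    | some _ => st.2.1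
  let nbrs2 := nbrs2opt.getD []
  let seen1 : PySem.Set String := PySem.Set.ofList p.2
  let seen2 : PySem.Set String := PySem.Set.ofList nbrs2
  (rest, nodes_removed,
   st.2.2.1 ++ ((PySem.List.dedup nbrs2).filter (fun nb => !seen1.contains nb)).map (fun nb => (p.1, nb)),
   st.2.2.2 ++ ((PySem.List.dedup p.2).filter (fun nb => !seen2.contains nb)).map (fun nb => (p.1, nb)))

def find_graph_differences_alt (graph1 : List (String × List String)) (graph2 : List (String × List String)) : List String × List String × (List (String × String)) × (List (String × String)) :=
  let st := (PySem.Dict.mk graph1).items.foldl pvStepB (PySem.Dict.mk graph2, ([] : List String), ([] : List (String × String)), ([] : List (String × String)))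
  let nodes_added : PySem.Set String := PySem.Set.ofList st.1.keys
  let edges_added := st.1.items.foldl (fun acc q => acc ++ (PySem.List.dedup q.2).map (fun nb => (q.1, nb))) st.2.2.1
  (nodes_added, PySem.Set.ofList st.2.1, PySem.Set.ofList edges_added, PySem.Set.ofList st.2.2.2)

-- ===== PRECONDITION & SPEC =====
-- Pre_ requires each association list to have distinct keys: a list with a duplicated key does not
-- encode any Python dict (both functions take dicts), so no claim is made about such lists.
def Pre_find_graph_differences (graph1 : List (String × List String)) (graph2 : List (String × List String)) : Prop :=
  (graph1.map Prod.fst).Nodup ∧ (graph2.map Prod.fst).Nodup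
instance (graph1 : List (String × List String)) (graph2 : List (String × List String)) : Decidable (Pre_find_graph_differences graph1 graph2) := by unfold Pre_find_graph_differences; infer_instance

def pvWitness_find_graph_differences : (List (String × List String)) × (List (String × List String)) :=
  ([("a", ["x", "y"]), ("c", ["x"])], [("b", ["x"]), ("a", ["y", "z"])])

def Spec_find_graph_differences (graph1 : List (String × List String)) (graph2 : List (String × List String)) (out : List String × List String × (List (String × String)) × (List (String × String))) : Prop := out = find_graph_differences_alt graph1 graph2
instance (graph1 : List (String × List String)) (graph2 : List (String × List String)) (out : List String × List String × (List (String × String)) × (List (String × String))) : Decidable (Spec_find_graph_differences graph1 graph2 out) := by unfold Spec_find_graph_differences; infer_instance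

-- ===== CLAIM (what is proved, stated in full; the proofs are below) =====
def Claim_equal_find_graph_differences : Prop := ∀ (graph1 : List (String × List String)) (graph2 : List (String × List String)), Dom_find_graph_differences graph1 graph2 → Pre_find_graph_differences graph1 graph2 → Spec_find_graph_differences graph1 graph2 (find_graph_differences graph1 graph2)

-- ===== LEMMAS AND PROOFS =====

-- canonical values both ports are reduced to
def pvNA (graph1 graph2 : List (String × List String)) : List String :=
  (graph2.map Prod.fst).filter (fun n => !(graph1.map Prod.fst).contains n)
def pvNR (graph1 graph2 : List (String × List String)) : List String :=
  (graph1.map Prod.fst).filter (fun n => !(graph2.map Prod.fst).contains n)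
def pvEA (graph1 graph2 : List (String × List String)) : List (String × String) :=
  graph1.flatMap (fun p => ((PySem.Set.ofList ((PySem.Dict.mk graph2).getD p.1 [])).filter (fun nb => !(p.2.contains nb))).map (fun nb => (p.1, nb)))
  ++ (graph2.filter (fun q => !((graph1.map Prod.fst).contains q.1))).flatMap (fun q => (PySem.Set.ofList q.2).map (fun nb => (q.1, nb)))
def pvER (graph1 graph2 : List (String × List String)) : List (String × String) :=
  graph1.flatMap (fun p => ((PySem.Set.ofList p.2).filter (fun nb => !(((PySem.Dict.mk graph2).getD p.1 []).contains nb))).map (fun nb => (p.1, nb)))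

theorem pv_contains_ofList {α : Type} [BEq α] [LawfulBEq α] (xs : List α) (x : α) :
    PySem.Set.contains (PySem.Set.ofList xs) x = xs.contains x := by
  by_cases h : x ∈ xs
  · rw [(PySem.Set.contains_iff _ _).mpr ((PySem.Set.mem_ofList xs x).mpr h)]
    exact (List.contains_iff_mem.mpr h).symm
  · have h2 : ¬ x ∈ PySem.Set.ofList xs := fun hc => h ((PySem.Set.mem_ofList xs x).mp hc)
    have e1 : PySem.Set.contains (PySem.Set.ofList xs) x = false := by
      by_contra hc
      exact h2 ((PySem.Set.contains_iff _ _).mp (eq_true_of_ne_false hc))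
    have e2 : xs.contains x = false := by
      by_contra hc
      exact h (List.contains_iff_mem.mp (eq_true_of_ne_false hc))
    rw [e1, e2]

theorem pv_listContains_ofList {α : Type} [BEq α] [LawfulBEq α] (xs : List α) (x : α) :
    List.contains (PySem.Set.ofList xs) x = List.contains xs x := by
  rw [← PySem.Set.contains_eq_listContains, pv_contains_ofList]

theorem pv_ofList_flatMap {γ : Type} (l : List γ) (key : γ → String)
    (f : γ → List (String × String)) (hnd : (l.map key).Nodup)
    (hblock : ∀ p ∈ l, (f p).Nodup)
    (htag : ∀ p ∈ l, ∀ e ∈ f p, e.1 = key p) :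
    PySem.Set.ofList (l.flatMap f) = l.flatMap f := by
  induction l with
  | nil => simp [PySem.Set.ofList_nil]
  | cons a l ih =>
    rw [List.flatMap_cons, PySem.Set.ofList_append, PySem.Set.update_eq_append_filter]
    have hnd' : (l.map key).Nodup := (List.nodup_cons.mp (by simpa using hnd)).2
    have hka : key a ∉ l.map key := (List.nodup_cons.mp (by simpa using hnd)).1
    rw [PySem.Set.ofList_eq_self_of_nodup _ (hblock a List.mem_cons_self),
      ih hnd' (fun p hp => hblock p (List.mem_cons_of_mem a hp))
        (fun p hp e he => htag p (List.mem_cons_of_mem a hp) e he)]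
    congr 1
    rw [List.filter_eq_self]
    intro e he
    obtain ⟨p, hp, hep⟩ := List.mem_flatMap.mp he
    have he1 : e.1 = key p := htag p (List.mem_cons_of_mem a hp) e hep
    have hne : e.1 ≠ key a := by
      rw [he1]; intro hc; exact hka (hc ▸ List.mem_map_of_mem hp)
    have hnm : e ∉ f a := by
      intro hc
      exact hne (htag a List.mem_cons_self e hc)
    simp only [Bool.not_eq_eq_eq_not, Bool.not_true]
    by_contra hc
    exact hnm (List.contains_iff_mem.mp (eq_true_of_ne_false (by simpa using hc)))

theorem pv_foldl_update_pair (fA fR : String → List (String × String)) :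
    ∀ (L : List String) (s t : List (String × String)), L.Nodup →
    (∀ e ∈ s, e.1 ∉ L) → (∀ e ∈ t, e.1 ∉ L) →
    (∀ n ∈ L, (fA n).Nodup ∧ ∀ e ∈ fA n, e.1 = n) →
    (∀ n ∈ L, (fR n).Nodup ∧ ∀ e ∈ fR n, e.1 = n) →
    L.foldl (fun (acc : PySem.Set (String × String) × PySem.Set (String × String)) n =>
        (PySem.Set.update acc.1 (fA n), PySem.Set.update acc.2 (fR n))) (s, t) =
      (s ++ L.flatMap fA, t ++ L.flatMap fR) := by
  intro L
  induction L with
  | nil => intro s t _ _ _ _ _; simp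
  | cons a L ih =>
    intro s t hnd hs ht hA hR
    obtain ⟨hna, hndL⟩ := List.nodup_cons.mp hnd
    rw [List.foldl_cons]
    have hupA : PySem.Set.update s (fA a) = s ++ fA a := by
      apply PySem.Set.update_eq_append_of_disjoint _ _ (hA a List.mem_cons_self).1
      intro x hx hxs
      exact hs x hxs (by rw [← (hA a List.mem_cons_self).2 x hx]; exact List.mem_cons_self)
    have hupR : PySem.Set.update t (fR a) = t ++ fR a := by
      apply PySem.Set.update_eq_append_of_disjoint _ _ (hR a List.mem_cons_self).1
      intro x hx hxt
      exact ht x hxt (by rw [← (hR a List.mem_cons_self).2 x hx]; exact List.mem_cons_self)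
    simp only [hupA, hupR]
    rw [ih (s ++ fA a) (t ++ fR a) hndL
      (by
        intro e he hmem
        rcases List.mem_append.mp he with h | h
        · exact hs e h (List.mem_cons_of_mem a hmem)
        · have := (hA a List.mem_cons_self).2 e h
          rw [this] at hmem; exact hna hmem)
      (by
        intro e he hmem
        rcases List.mem_append.mp he with h | h
        · exact ht e h (List.mem_cons_of_mem a hmem)
        · have := (hR a List.mem_cons_self).2 e h
          rw [this] at hmem; exact hna hmem)
      (fun n hn => hA n (List.mem_cons_of_mem a hn))
      (fun n hn => hR n (List.mem_cons_of_mem a hn))]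
    simp

theorem pv_keys_mk {ν : Type} (g : List (String × ν)) :
    PySem.Dict.keys (PySem.Dict.mk g) = g.map Prod.fst := rfl

theorem pv_getD_mk_of_mem {ν : Type} (g : List (String × ν)) (p : String × ν)
    (hnd : (g.map Prod.fst).Nodup) (hp : p ∈ g) (d : ν) :
    PySem.Dict.getD (PySem.Dict.mk g) p.1 d = p.2 :=
  PySem.Dict.getD_of_mem_items (d := PySem.Dict.mk g) (by exact hp) hnd d

theorem pv_dict_contains_mk {ν : Type} (g : List (String × ν)) (n : String) :
    PySem.Dict.contains (PySem.Dict.mk g) n = (g.map Prod.fst).contains n := by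
  by_cases h : n ∈ g.map Prod.fst
  · have h2 : PySem.Dict.contains (PySem.Dict.mk g) n = true := by
      obtain ⟨p, hp, he⟩ := List.mem_map.mp h
      simp only [PySem.Dict.contains, List.any_eq_true]
      exact ⟨p, hp, by simp [he]⟩
    rw [h2, List.contains_iff_mem.mpr h]
  · have h2 : PySem.Dict.contains (PySem.Dict.mk g) n = false := by
      by_contra hc
      have := eq_true_of_ne_false hc
      simp only [PySem.Dict.contains, List.any_eq_true] at this
      obtain ⟨p, hp, he⟩ := this
      exact h (List.mem_map.mpr ⟨p, hp, by simpa using he⟩)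
    rw [h2]
    by_contra hc
    exact h (List.contains_iff_mem.mp (eq_true_of_ne_false (fun hf => hc hf.symm)))

theorem pv_getD_mk_of_not_mem {ν : Type} (g : List (String × ν)) (n : String)
    (h : n ∉ g.map Prod.fst) (d : ν) :
    PySem.Dict.getD (PySem.Dict.mk g) n d = d := by
  apply PySem.Dict.getD_of_not_contains
  rw [pv_dict_contains_mk]
  by_contra hc
  exact h (List.contains_iff_mem.mp (eq_true_of_ne_false hc))

theorem pv_diff_nil {α : Type} [BEq α] (s : List α) : PySem.Set.diff s [] = s := by
  simp [PySem.Set.diff, PySem.Set.contains]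

theorem pv_map_fst_filter {ν : Type} (g : List (String × ν)) (c : String → Bool) :
    (g.filter (fun q => c q.1)).map Prod.fst = (g.map Prod.fst).filter c := by
  induction g with
  | nil => rfl
  | cons a g ih =>
    by_cases h : c a.1 = true
    · simp [List.filter_cons, h, ih]
    · simp only [Bool.not_eq_true] at h
      simp [List.filter_cons, h, ih]

theorem pv_get?_mk_filter_ne {ν : Type} (g : List (String × ν)) (k x : String) (h : x ≠ k) :
    (PySem.Dict.mk (g.filter (fun p => !(p.1 == k)))).get? x = (PySem.Dict.mk g).get? x := by
  simp only [PySem.Dict.get?, PySem.Dict.items]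
  induction g with
  | nil => rfl
  | cons a g ih =>
    by_cases ha : a.1 = k
    · rw [List.filter_cons_of_neg (by simp [ha])]
      rw [List.find?_cons_of_neg (by simp [ha]; exact fun hc => h hc.symm)]
      exact ih
    · rw [List.filter_cons_of_pos (by simp [ha])]
      by_cases hx : a.1 = x
      · rw [List.find?_cons_of_pos (by simp [hx]), List.find?_cons_of_pos (by simp [hx])]
      · rw [List.find?_cons_of_neg (by simp [hx]), List.find?_cons_of_neg (by simp [hx])]
        exact ih

theorem pv_getD_mk_filter_ne {ν : Type} (g : List (String × ν)) (k x : String) (h : x ≠ k) (d : ν) :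
    (PySem.Dict.mk (g.filter (fun p => !(p.1 == k)))).getD x d = (PySem.Dict.mk g).getD x d := by
  rw [PySem.Dict.getD_eq_get?_getD, PySem.Dict.getD_eq_get?_getD, pv_get?_mk_filter_ne g k x h]

theorem pv_contains_map_fst_filter_ne {ν : Type} (g : List (String × ν)) (k n : String) (h : n ≠ k) :
    ((g.filter (fun p => !(p.1 == k))).map Prod.fst).contains n = (g.map Prod.fst).contains n := by
  have hmem : n ∈ (g.filter (fun p => !(p.1 == k))).map Prod.fst ↔ n ∈ g.map Prod.fst := by
    simp only [List.mem_map, List.mem_filter]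
    constructor
    · rintro ⟨p, ⟨hp, _⟩, rfl⟩; exact ⟨p, hp, rfl⟩
    · rintro ⟨p, hp, rfl⟩; exact ⟨p, ⟨hp, by simpa using h⟩, rfl⟩
  by_cases hn : n ∈ g.map Prod.fst
  · rw [List.contains_iff_mem.mpr hn, List.contains_iff_mem.mpr (hmem.mpr hn)]
  · have e1 : ((g.filter (fun p => !(p.1 == k))).map Prod.fst).contains n = false := by
      by_contra hc
      exact hn (hmem.mp (List.contains_iff_mem.mp (eq_true_of_ne_false hc)))
    have e2 : (g.map Prod.fst).contains n = false := by
      by_contra hc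
      exact hn (List.contains_iff_mem.mp (eq_true_of_ne_false hc))
    rw [e1, e2]

-- the single-pass/consume loop of B, characterised
theorem pv_b_fold (l : List (String × List String)) :
    ∀ (g2 : List (String × List String)) (nr : List String) (ea er : List (String × String)),
    (l.map Prod.fst).Nodup → (g2.map Prod.fst).Nodup →
    l.foldl pvStepB (PySem.Dict.mk g2, nr, ea, er) =
      (PySem.Dict.mk (g2.filter (fun q => !((l.map Prod.fst).contains q.1))),
       nr ++ (l.map Prod.fst).filter (fun n => !((g2.map Prod.fst).contains n)),
       ea ++ l.flatMap (fun p => ((PySem.Set.ofList ((PySem.Dict.mk g2).getD p.1 [])).filter (fun nb => !(p.2.contains nb))).map (fun nb => (p.1, nb))),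
       er ++ l.flatMap (fun p => ((PySem.Set.ofList p.2).filter (fun nb => !(((PySem.Dict.mk g2).getD p.1 []).contains nb))).map (fun nb => (p.1, nb)))) := by
  induction l with
  | nil =>
    intro g2 nr ea er _ _
    simp
  | cons a l ih =>
    intro g2 nr ea er hnd hnd2
    rw [List.map_cons] at hnd
    obtain ⟨hna, hndl⟩ := List.nodup_cons.mp hnd
    have hne_l : ∀ p ∈ l, p.1 ≠ a.1 := by
      intro p hp hc
      exact hna (hc ▸ List.mem_map_of_mem hp)
    rw [List.foldl_cons]
    by_cases hmem : a.1 ∈ g2.map Prod.fst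
    · -- node present in the residual dict: popped, neighbours diffed
      obtain ⟨q, hq, hq1⟩ := List.mem_map.mp hmem
      have hget : (PySem.Dict.mk g2).get? a.1 = some q.2 := by
        rw [← hq1]
        exact PySem.Dict.get?_of_mem_items (d := PySem.Dict.mk g2) (by exact hq) hnd2
      have hgetD : (PySem.Dict.mk g2).getD a.1 [] = q.2 := by
        rw [PySem.Dict.getD_eq_get?_getD, hget]; rfl
      have hstep : pvStepB (PySem.Dict.mk g2, nr, ea, er) a =
          (PySem.Dict.mk (g2.filter (fun p => !(p.1 == a.1))), nr,
           ea ++ ((PySem.Set.ofList q.2).filter (fun nb => !(PySem.Set.ofList a.2).contains nb)).map (fun nb => (a.1, nb)),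
           er ++ ((PySem.Set.ofList a.2).filter (fun nb => !(PySem.Set.ofList q.2).contains nb)).map (fun nb => (a.1, nb))) := by
        simp only [pvStepB, hget, PySem.Dict.erase, PySem.Dict.items, Option.getD_some,
          PySem.List.dedup_eq_ofList]
      rw [hstep]
      have hnd2' : ((g2.filter (fun p => !(p.1 == a.1))).map Prod.fst).Nodup :=
        hnd2.sublist (List.Sublist.map Prod.fst List.filter_sublist)
      rw [ih (g2.filter (fun p => !(p.1 == a.1))) nr _ _ hndl hnd2']
      refine Prod.ext ?_ (Prod.ext ?_ (Prod.ext ?_ ?_))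
      · -- dict component
        show PySem.Dict.mk _ = PySem.Dict.mk _
        rw [List.filter_filter]
        congr 1
        apply List.filter_congr
        intro q' _
        simp only [List.map_cons, List.contains_cons]
        cases hq' : (q'.1 == a.1) <;> cases hl : (l.map Prod.fst).contains q'.1 <;> simp [hq', hl]
      · -- nodes_removed component
        show nr ++ _ = nr ++ _
        congr 1
        have hc2 : (g2.map Prod.fst).contains a.1 = true := List.contains_iff_mem.mpr hmem
        rw [List.map_cons, List.filter_cons_of_neg (by simp only [hc2]; decide)]
        apply List.filter_congr
        intro n hn
        obtain ⟨p, hp, rfl⟩ := List.mem_map.mp hn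
        rw [pv_contains_map_fst_filter_ne g2 a.1 p.1 (hne_l p hp)]
      · -- edges_added component
        show (ea ++ _) ++ _ = ea ++ _
        rw [List.append_assoc]
        congr 1
        rw [List.flatMap_cons]
        congr 1
        · rw [hgetD]
          congr 1
          apply List.filter_congr
          intro nb _
          rw [PySem.Set.contains_eq_listContains, pv_listContains_ofList]
        · apply List.flatMap_congr
          intro p hp
          rw [pv_getD_mk_filter_ne g2 a.1 p.1 (hne_l p hp)]
      · -- edges_removed component
        show (er ++ _) ++ _ = er ++ _
        rw [List.append_assoc]
        congr 1
        rw [List.flatMap_cons]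
        congr 1
        · rw [hgetD]
          congr 1
          apply List.filter_congr
          intro nb _
          rw [PySem.Set.contains_eq_listContains, pv_listContains_ofList]
        · apply List.flatMap_congr
          intro p hp
          rw [pv_getD_mk_filter_ne g2 a.1 p.1 (hne_l p hp)]
    · -- node absent from the residual dict: recorded as removed, all its edges removed
      have hget : (PySem.Dict.mk g2).get? a.1 = none := by
        rw [PySem.Dict.get?_eq_none_iff_not_mem_keys]
        simpa [pv_keys_mk] using hmem
      have hfilter_id : g2.filter (fun p => !(p.1 == a.1)) = g2 := by
        rw [List.filter_eq_self]
        intro p hp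
        have : p.1 ≠ a.1 := fun hc => hmem (hc ▸ List.mem_map_of_mem hp)
        simpa using this
      have hgetD : (PySem.Dict.mk g2).getD a.1 [] = [] := by
        rw [PySem.Dict.getD_eq_get?_getD, hget]; rfl
      have hstep : pvStepB (PySem.Dict.mk g2, nr, ea, er) a =
          (PySem.Dict.mk g2, nr ++ [a.1], ea,
           er ++ (PySem.Set.ofList a.2).map (fun nb => (a.1, nb))) := by
        simp only [pvStepB, hget, PySem.Dict.erase, PySem.Dict.items, hfilter_id,
          Option.getD_none, PySem.List.dedup_eq_ofList, PySem.Set.ofList_nil]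
        have hfs : List.filter (fun nb => !PySem.Set.contains [] nb) (PySem.Set.ofList a.2)
            = PySem.Set.ofList a.2 := by
          rw [List.filter_eq_self]
          intro nb _
          simp [PySem.Set.contains]
        rw [hfs]
        simp
      rw [hstep, ih g2 (nr ++ [a.1]) _ _ hndl hnd2]
      refine Prod.ext ?_ (Prod.ext ?_ (Prod.ext ?_ ?_))
      · show PySem.Dict.mk _ = PySem.Dict.mk _
        congr 1
        apply List.filter_congr
        intro q' hq'
        have : q'.1 ≠ a.1 := fun hc => hmem (hc ▸ List.mem_map_of_mem hq')
        simp only [List.map_cons, List.contains_cons]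
        have hbe : (q'.1 == a.1) = false := by simpa using this
        rw [hbe]
        simp
      · show (nr ++ [a.1]) ++ _ = nr ++ _
        rw [List.append_assoc]
        congr 1
        have hcf : (g2.map Prod.fst).contains a.1 = false := by
          by_contra hc
          exact hmem (List.contains_iff_mem.mp (eq_true_of_ne_false hc))
        rw [List.map_cons, List.filter_cons_of_pos (by simp only [hcf]; decide)]
        rfl
      · show ea ++ _ = ea ++ _
        congr 1
        rw [List.flatMap_cons, hgetD]
        simp [PySem.Set.ofList_nil]
      · show (er ++ _) ++ _ = er ++ _
        rw [List.append_assoc]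
        congr 1
        rw [List.flatMap_cons]
        congr 1
        rw [hgetD]
        rw [List.filter_eq_self.mpr]
        intro nb _
        simp

-- blocks of edges tagged by distinct nodes are nodup and fst-tagged
theorem pv_block_nodup (n : String) (xs : List String) (c : String → Bool) :
    (((PySem.Set.ofList xs).filter c).map (fun nb => (n, nb))).Nodup := by
  apply List.Nodup.map
  · intro a b hab
    simpa using congrArg Prod.snd hab
  · exact List.Nodup.filter _ (PySem.Set.nodup_ofList _)

theorem pv_block_tag (n : String) (xs : List String) (c : String → Bool) :
    ∀ e ∈ ((PySem.Set.ofList xs).filter c).map (fun nb => (n, nb)), e.1 = n := by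
  intro e he
  obtain ⟨nb, _, rfl⟩ := List.mem_map.mp he
  rfl

-- A reduced to the canonical tuple
theorem pv_a_canon (graph1 graph2 : List (String × List String))
    (h1 : (graph1.map Prod.fst).Nodup) (h2 : (graph2.map Prod.fst).Nodup) :
    find_graph_differences graph1 graph2 = (pvNA graph1 graph2, pvNR graph1 graph2, pvEA graph1 graph2, pvER graph1 graph2) := by
  simp only [find_graph_differences, pvNA, pvNR, pvEA, pvER]
  rw [pv_keys_mk graph1, pv_keys_mk graph2]
  rw [PySem.Set.ofList_eq_self_of_nodup _ h1, PySem.Set.ofList_eq_self_of_nodup _ h2]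
  simp only [PySem.Set.union]
  rw [PySem.Set.update_eq_append_filter, PySem.Set.ofList_eq_self_of_nodup _ h2]
  simp only [PySem.Set.contains_eq_listContains]
  have hN2 : ∀ n ∈ (graph2.map Prod.fst).filter
      (fun y => !(graph1.map Prod.fst).contains y), n ∉ graph1.map Prod.fst := by
    intro n hn hc
    have hb := (List.mem_filter.mp hn).2
    rw [List.contains_iff_mem.mpr hc] at hb
    simp at hb
  have hU : ((graph1.map Prod.fst) ++ (graph2.map Prod.fst).filter
      (fun y => !(graph1.map Prod.fst).contains y)).Nodup := by
    refine List.Nodup.append h1 (h2.filter _) ?_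
    intro a ha hb
    exact hN2 a hb ha
  have hprops : ∀ (gx gy : List (String × List String)),
      ∀ n ∈ (graph1.map Prod.fst) ++ (graph2.map Prod.fst).filter
        (fun y => !(graph1.map Prod.fst).contains y),
      (List.map (fun neighbor => (n, neighbor))
        ((PySem.Set.ofList ((PySem.Dict.mk gx).getD n [])).diff
          (PySem.Set.ofList ((PySem.Dict.mk gy).getD n [])))).Nodup ∧
      ∀ e ∈ List.map (fun neighbor => (n, neighbor))
        ((PySem.Set.ofList ((PySem.Dict.mk gx).getD n [])).diff
          (PySem.Set.ofList ((PySem.Dict.mk gy).getD n []))), e.1 = n := by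
    intro gx gy n _
    constructor
    · refine List.Nodup.map ?_ (PySem.Set.nodup_diff _ _ (PySem.Set.nodup_ofList _))
      intro a b hab
      simpa using congrArg Prod.snd hab
    · intro e he
      obtain ⟨nb, _, rfl⟩ := List.mem_map.mp he
      rfl
  have hfold := pv_foldl_update_pair
    (fun node => List.map (fun neighbor => (node, neighbor))
      ((PySem.Set.ofList ((PySem.Dict.mk graph2).getD node [])).diff
        (PySem.Set.ofList ((PySem.Dict.mk graph1).getD node []))))
    (fun node => List.map (fun neighbor => (node, neighbor))
      ((PySem.Set.ofList ((PySem.Dict.mk graph1).getD node [])).diff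
        (PySem.Set.ofList ((PySem.Dict.mk graph2).getD node []))))
    ((graph1.map Prod.fst) ++ (graph2.map Prod.fst).filter
      (fun y => !(graph1.map Prod.fst).contains y))
    PySem.Set.empty PySem.Set.empty hU
    (by intro e he; simp [PySem.Set.empty] at he)
    (by intro e he; simp [PySem.Set.empty] at he)
    (hprops graph2 graph1) (hprops graph1 graph2)
  simp only [] at hfold
  rw [hfold]
  simp only [PySem.Set.empty, List.nil_append, List.flatMap_append, Prod.mk.injEq]
  refine ⟨?_, ?_, ?_, ?_⟩
  · -- nodes_added
    simp only [PySem.Set.diff, PySem.Set.contains_eq_listContains]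
  · -- nodes_removed
    simp only [PySem.Set.diff, PySem.Set.contains_eq_listContains]
  · -- edges_added
    congr 1
    · -- part over graph1's nodes
      rw [List.flatMap_map]
      apply List.flatMap_congr
      intro p hp
      show List.map (fun neighbor => (p.1, neighbor))
        ((PySem.Set.ofList ((PySem.Dict.mk graph2).getD p.1 [])).diff
          (PySem.Set.ofList ((PySem.Dict.mk graph1).getD p.1 []))) = _
      rw [pv_getD_mk_of_mem graph1 p h1 hp]
      simp only [PySem.Set.diff, PySem.Set.contains_eq_listContains]
      congr 1
      apply List.filter_congr
      intro nb _
      rw [pv_listContains_ofList]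
    · -- part over graph2-only nodes
      rw [← pv_map_fst_filter graph2 (fun n => !(graph1.map Prod.fst).contains n), List.flatMap_map]
      apply List.flatMap_congr
      intro q hq
      show List.map (fun neighbor => (q.1, neighbor))
        ((PySem.Set.ofList ((PySem.Dict.mk graph2).getD q.1 [])).diff
          (PySem.Set.ofList ((PySem.Dict.mk graph1).getD q.1 []))) = _
      have hq1 : q.1 ∉ graph1.map Prod.fst := by
        have hb := (List.mem_filter.mp hq).2
        intro hc
        rw [List.contains_iff_mem.mpr hc] at hb
        simp at hb
      rw [pv_getD_mk_of_mem graph2 q h2 (List.mem_filter.mp hq).1,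
        pv_getD_mk_of_not_mem graph1 q.1 hq1, PySem.Set.ofList_nil, pv_diff_nil]
  · -- edges_removed
    have hnil : ((graph2.map Prod.fst).filter
        (fun y => !(graph1.map Prod.fst).contains y)).flatMap (fun node =>
          List.map (fun neighbor => (node, neighbor))
            ((PySem.Set.ofList ((PySem.Dict.mk graph1).getD node [])).diff
              (PySem.Set.ofList ((PySem.Dict.mk graph2).getD node [])))) = [] := by
      apply List.flatMap_eq_nil_iff.mpr
      intro n hn
      rw [pv_getD_mk_of_not_mem graph1 n (hN2 n hn), PySem.Set.ofList_nil]
      simp [PySem.Set.diff]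
    rw [hnil, List.append_nil, List.flatMap_map]
    apply List.flatMap_congr
    intro p hp
    show List.map (fun neighbor => (p.1, neighbor))
      ((PySem.Set.ofList ((PySem.Dict.mk graph1).getD p.1 [])).diff
        (PySem.Set.ofList ((PySem.Dict.mk graph2).getD p.1 []))) = _
    rw [pv_getD_mk_of_mem graph1 p h1 hp]
    simp only [PySem.Set.diff, PySem.Set.contains_eq_listContains]
    congr 1
    apply List.filter_congr
    intro nb _
    rw [pv_listContains_ofList]

-- B reduced to the canonical tuple
theorem pv_b_canon (graph1 graph2 : List (String × List String))
    (h1 : (graph1.map Prod.fst).Nodup) (h2 : (graph2.map Prod.fst).Nodup) :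
    find_graph_differences_alt graph1 graph2 = (pvNA graph1 graph2, pvNR graph1 graph2, pvEA graph1 graph2, pvER graph1 graph2) := by
  simp only [find_graph_differences_alt, PySem.Dict.items]
  rw [pv_b_fold graph1 graph2 [] [] [] h1 h2]
  simp only [PySem.Dict.items, List.nil_append, pv_keys_mk, PySem.List.dedup_eq_ofList]
  have hkeys : (graph2.filter (fun q => !((graph1.map Prod.fst).contains q.1))).map Prod.fst
      = (graph2.map Prod.fst).filter (fun n => !((graph1.map Prod.fst).contains n)) :=
    pv_map_fst_filter graph2 (fun n => !((graph1.map Prod.fst).contains n))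
  have hndRest : ((graph2.filter (fun q => !((graph1.map Prod.fst).contains q.1))).map Prod.fst).Nodup :=
    h2.sublist (List.Sublist.map Prod.fst List.filter_sublist)
  refine Prod.ext ?_ (Prod.ext ?_ (Prod.ext ?_ ?_))
  · -- nodes_added
    show PySem.Set.ofList _ = pvNA graph1 graph2
    rw [hkeys, pvNA]
    exact PySem.Set.ofList_eq_self_of_nodup _ (h2.filter _)
  · -- nodes_removed
    show PySem.Set.ofList _ = pvNR graph1 graph2
    rw [pvNR]
    exact PySem.Set.ofList_eq_self_of_nodup _ (h1.filter _)
  · -- edges_added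
    show PySem.Set.ofList _ = pvEA graph1 graph2
    rw [PySem.List.foldl_append_eq_flatMap, pvEA]
    set eaMain := graph1.flatMap (fun p => ((PySem.Set.ofList ((PySem.Dict.mk graph2).getD p.1 [])).filter (fun nb => !(p.2.contains nb))).map (fun nb => (p.1, nb))) with hEA1
    set eaRest := (graph2.filter (fun q => !((graph1.map Prod.fst).contains q.1))).flatMap (fun q => (PySem.Set.ofList q.2).map (fun nb => (q.1, nb))) with hEA2
    have hMain : PySem.Set.ofList eaMain = eaMain := by
      rw [hEA1]
      exact pv_ofList_flatMap graph1 Prod.fst _ h1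
        (fun p _ => pv_block_nodup p.1 _ _) (fun p _ => pv_block_tag p.1 _ _)
    have hRest : PySem.Set.ofList eaRest = eaRest := by
      rw [hEA2]
      refine pv_ofList_flatMap _ Prod.fst _ hndRest ?_ ?_
      · intro q _
        have := pv_block_nodup q.1 q.2 (fun _ => true)
        simpa using this
      · intro q _ e he
        obtain ⟨nb, _, rfl⟩ := List.mem_map.mp he
        rfl
    rw [PySem.Set.ofList_append, hMain, PySem.Set.update_eq_append_filter, hRest]
    congr 1
    rw [List.filter_eq_self]
    intro e he
    obtain ⟨q, hq, heq⟩ := List.mem_flatMap.mp (hEA2 ▸ he)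
    obtain ⟨nb, _, rfl⟩ := List.mem_map.mp heq
    have hq1 : q.1 ∉ graph1.map Prod.fst := by
      have hb := (List.mem_filter.mp hq).2
      intro hc
      rw [List.contains_iff_mem.mpr hc] at hb
      simp at hb
    have hnm : (q.1, nb) ∉ eaMain := by
      intro hc
      obtain ⟨p, hp, hep⟩ := List.mem_flatMap.mp (hEA1 ▸ hc)
      obtain ⟨nb', _, hee⟩ := List.mem_map.mp hep
      have : q.1 = p.1 := (Prod.mk.injEq _ _ _ _ ▸ hee.symm).1
      exact hq1 (this ▸ List.mem_map_of_mem hp)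
    simp only [Bool.not_eq_eq_eq_not, Bool.not_true]
    by_contra hc
    exact hnm (List.contains_iff_mem.mp (eq_true_of_ne_false (by simpa using hc)))
  · -- edges_removed
    show PySem.Set.ofList _ = pvER graph1 graph2
    rw [pvER]
    exact pv_ofList_flatMap graph1 Prod.fst _ h1
      (fun p _ => pv_block_nodup p.1 _ _) (fun p _ => pv_block_tag p.1 _ _)

-- ===== VERDICT (by name: the statement is the Claim_ definition above) =====
theorem find_graph_differences_spec : Claim_equal_find_graph_differences := by
  intro graph1 graph2 _ hpre
  show find_graph_differences graph1 graph2 = find_graph_differences_alt graph1 graph2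
  rw [pv_a_canon graph1 graph2 hpre.1 hpre.2, pv_b_canon graph1 graph2 hpre.1 hpre.2]
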